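-- pv_equiv track=rewrite | github.com/JeandsGomes/Exercicio_Arquitetura_Codigo_de_Hammin | teste_do_teste.py | paridade_lista
-- ===== SOURCE A (Python) =====
-- def paridade_lista(posicao_bit_verificacao,codigo_ampliado):
--     contador_posicao = 0
--     paridade = []
--
--     posicoes = []
--
--     flag = 1
--     for index in range(posicao_bit_verificacao,len(codigo_ampliado)):
--
--         if(index != posicao_bit_verificacao):
--
--             if(contador_posicao==(posicao_bit_verificacao+1)):
--                 flag = 0
--             elif(contador_posicao==0):
--                 flag = 1
--
--             if(flag == 1):
--                 paridade.append(codigo_ampliado[index])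
--                 posicoes.append(index)
--                 contador_posicao += 1
--
--             elif(flag == 0):
--                 contador_posicao -= 1
--
--         else:
--             contador_posicao += 1
--
--     return paridade
-- ===== SOURCE B (Python) =====
-- def paridade_lista(posicao_bit_verificacao, codigo_ampliado):
--     p = posicao_bit_verificacao
--     periodo = 2 * (p + 1)
--     return [codigo_ampliado[i]
--             for i in range(p + 1, len(codigo_ampliado))
--             if (i - p) % periodo <= p]
-- ===== Notes on version B (the rewrite author's own statement) =====
-- stated objective: simpler
-- what changed: The flag/contador state machine is replaced by a single comprehension over indices p+1..n-1 that keeps codigo_ampliado[i] exactly when (i-p) mod 2*(p+1) <= p (the periodic Hamming parity-group pattern).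
-- outside the precondition, e.g. on paridade_lista(-2, [1, 2, 3]): A returns [3, 1, 2, 3], B returns []
import Mathlib
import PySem

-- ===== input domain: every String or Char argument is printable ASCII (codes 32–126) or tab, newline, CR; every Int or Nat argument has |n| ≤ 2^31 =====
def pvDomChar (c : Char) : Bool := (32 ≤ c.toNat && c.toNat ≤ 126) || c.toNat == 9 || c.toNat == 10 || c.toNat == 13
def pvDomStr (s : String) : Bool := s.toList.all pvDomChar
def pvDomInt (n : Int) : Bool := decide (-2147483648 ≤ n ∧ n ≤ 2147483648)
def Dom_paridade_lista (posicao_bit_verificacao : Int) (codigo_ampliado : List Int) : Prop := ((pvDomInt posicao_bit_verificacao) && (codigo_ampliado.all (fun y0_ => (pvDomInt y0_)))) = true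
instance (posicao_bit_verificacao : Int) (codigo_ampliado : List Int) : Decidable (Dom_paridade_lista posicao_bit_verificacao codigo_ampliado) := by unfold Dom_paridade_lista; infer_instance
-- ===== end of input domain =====

-- B replaces A's flag/contador state machine by one comprehension with the arithmetic
-- predicate (i-p) mod 2*(p+1) <= p over indices p+1..n-1 (objective: simpler).

-- ===== PORT A =====
-- loop body of A: state is (contador_posicao, paridade, flag)
def pvStepA (p : Int) (code : List Int) (st : Int × List Int × Int) (index : Int) : Int × List Int × Int :=
  let contador := st.1
  let paridade := st.2.1
  let flag := st.2.2
  if index ≠ p then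
    let flag := if contador = p + 1 then (0 : Int) else if contador = 0 then 1 else flag
    if flag = 1 then (contador + 1, paridade ++ [PySem.List.pyGetD code index 0], flag)
    else if flag = 0 then (contador - 1, paridade, flag)
    else (contador, paridade, flag)
  else (contador + 1, paridade, flag)

def paridade_lista (posicao_bit_verificacao : Int) (codigo_ampliado : List Int) : List Int :=
  ((PySem.List.pyRange posicao_bit_verificacao (codigo_ampliado.length : Int) 1).foldl
    (pvStepA posicao_bit_verificacao codigo_ampliado) (0, [], 1)).2.1

-- ===== PORT B =====
def pvStepB (p : Int) (code : List Int) (acc : List Int) (i : Int) : List Int :=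
  if PySem.Int.mod (i - p) (2 * (p + 1)) ≤ p then acc ++ [PySem.List.pyGetD code i 0] else acc

def paridade_lista_alt (posicao_bit_verificacao : Int) (codigo_ampliado : List Int) : List Int :=
  (PySem.List.pyRange (posicao_bit_verificacao + 1) (codigo_ampliado.length : Int) 1).foldl
    (pvStepB posicao_bit_verificacao codigo_ampliado) []

-- ===== PRECONDITION & SPEC =====
-- Pre_ excludes negative posicao_bit_verificacao, outside the function's natural domain
-- (a Hamming parity-bit position): there A's negative-index wraparound returns accidental
-- values and B's comprehension naturally differs (and raises ZeroDivisionError at -1).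
def Pre_paridade_lista (posicao_bit_verificacao : Int) (codigo_ampliado : List Int) : Prop :=
  0 ≤ posicao_bit_verificacao
instance (posicao_bit_verificacao : Int) (codigo_ampliado : List Int) : Decidable (Pre_paridade_lista posicao_bit_verificacao codigo_ampliado) := by unfold Pre_paridade_lista; infer_instance

def pvWitness_paridade_lista : Int × List Int := (2, [1, 0, 1, 1, 0, 1, 0, 1])

def Spec_paridade_lista (posicao_bit_verificacao : Int) (codigo_ampliado : List Int) (out : List Int) : Prop := out = paridade_lista_alt posicao_bit_verificacao codigo_ampliado
instance (posicao_bit_verificacao : Int) (codigo_ampliado : List Int) (out : List Int) : Decidable (Spec_paridade_lista posicao_bit_verificacao codigo_ampliado out) := by unfold Spec_paridade_lista; infer_instance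

-- ===== CLAIM (what is proved, stated in full; the proofs are below) =====
def Claim_equal_paridade_lista : Prop := ∀ (posicao_bit_verificacao : Int) (codigo_ampliado : List Int), Dom_paridade_lista posicao_bit_verificacao codigo_ampliado → Pre_paridade_lista posicao_bit_verificacao codigo_ampliado → Spec_paridade_lista posicao_bit_verificacao codigo_ampliado (paridade_lista posicao_bit_verificacao codigo_ampliado)

-- ===== LEMMAS AND PROOFS =====

-- (a+1) % d in terms of a % d, for 1 < d
lemma pv_emod_succ (a d : Int) (hd : 1 < d) :
    (a + 1) % d = if a % d = d - 1 then 0 else a % d + 1 := by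
  have h0 : 0 ≤ a % d := Int.emod_nonneg a (by omega)
  have h1 : a % d < d := Int.emod_lt_of_pos a (by omega)
  have hdecomp : a + 1 = (a % d + 1) + d * (a / d) := by
    have := Int.ediv_add_emod a d; omega
  rw [hdecomp, Int.add_mul_emod_self_left]
  split_ifs with h
  · rw [h]; simp
  · exact Int.emod_eq_of_lt (by omega) (by omega)

-- loop invariant: at index i (p < i), with r = (i-1-p) % (2*(p+1)) the "phase" of the
-- machine, A's state is (r+1, 1) when r ≤ p and (2*(p+1)-1-r, 0) otherwise, and A's
-- remaining fold appends exactly the elements B's predicate keeps.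
lemma pv_loop (p : Int) (code : List Int) (hp : 0 ≤ p) :
    ∀ (n : Nat) (i contador flag : Int) (acc : List Int),
      ((code.length : Int) - i).toNat = n → p < i →
      ((i - 1 - p) % (2*(p+1)) ≤ p ∧ contador = (i - 1 - p) % (2*(p+1)) + 1 ∧ flag = 1 ∨
       p + 1 ≤ (i - 1 - p) % (2*(p+1)) ∧ contador = 2*(p+1) - 1 - (i - 1 - p) % (2*(p+1)) ∧ flag = 0) →
      ((PySem.List.pyRange i (code.length : Int) 1).foldl (pvStepA p code) (contador, acc, flag)).2.1
        = (PySem.List.pyRange i (code.length : Int) 1).foldl (pvStepB p code) acc := by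
  intro n
  induction n with
  | zero =>
    intro i contador flag acc hn _ _
    have hle : (code.length : Int) ≤ i := by omega
    rw [PySem.List.pyRange_one_eq_nil hle]
    simp
  | succ n ih =>
    intro i contador flag acc hn hpi hinv
    have hilt : i < (code.length : Int) := by omega
    have hd : (1 : Int) < 2*(p+1) := by omega
    set per : Int := 2*(p+1) with hper
    set r : Int := (i - 1 - p) % per with hr
    have hr0 : 0 ≤ r := Int.emod_nonneg _ (by omega)
    have hrlt : r < per := Int.emod_lt_of_pos _ (by omega)
    have hrnext : (i - p) % per = if r = per - 1 then 0 else r + 1 := by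
      have := pv_emod_succ (i - 1 - p) per hd
      simpa [show i - 1 - p + 1 = i - p by ring] using this
    have hmod : PySem.Int.mod (i - p) per = (i - p) % per :=
      PySem.Int.mod_eq_emod_of_pos (by omega)
    have hshift : i + 1 - 1 - p = i - p := by ring
    rw [PySem.List.pyRange_one_cons hilt]
    simp only [List.foldl_cons]
    have hne : i ≠ p := by omega
    rcases hinv with ⟨hL, hc, hf⟩ | ⟨hR, hc, hf⟩
    · by_cases hrp : r = p
      · -- contador = p+1 : flag becomes 0, no append
        have hstepA : pvStepA p code (contador, acc, flag) i = (contador - 1, acc, 0) := by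
          subst hc
          simp [pvStepA, hne, hrp]
        have hrn : (i - p) % per = r + 1 := by
          rw [hrnext, if_neg (by omega)]
        have hstepB : pvStepB p code acc i = acc := by
          simp only [pvStepB, ← hper, hmod, hrn]
          rw [if_neg (by omega)]
        rw [hstepA, hstepB]
        apply ih (i + 1) _ _ acc (by omega) (by omega)
        right
        refine ⟨?_, ?_, rfl⟩ <;> rw [hshift, hrn] <;> omega
      · -- flag stays 1 : append
        have hstepA : pvStepA p code (contador, acc, flag) i
            = (contador + 1, acc ++ [PySem.List.pyGetD code i 0], 1) := by
          subst hc; subst hf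
          simp [pvStepA, hne, show ¬(r + 1 = p + 1) from by omega,
            show ¬(r + 1 = 0) from by omega]
        have hrn : (i - p) % per = r + 1 := by
          rw [hrnext, if_neg (by omega)]
        have hstepB : pvStepB p code acc i = acc ++ [PySem.List.pyGetD code i 0] := by
          simp only [pvStepB, ← hper, hmod, hrn]
          rw [if_pos (by omega)]
        rw [hstepA, hstepB]
        apply ih (i + 1) _ _ _ (by omega) (by omega)
        left
        refine ⟨?_, ?_, rfl⟩ <;> rw [hshift, hrn] <;> omega
    · by_cases hrtop : r = per - 1
      · -- contador = 0 : flag becomes 1, append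
        have hstepA : pvStepA p code (contador, acc, flag) i
            = (contador + 1, acc ++ [PySem.List.pyGetD code i 0], 1) := by
          have hc0 : contador = 0 := by omega
          subst hc0
          simp [pvStepA, hne, show ¬((0 : Int) = p + 1) from by omega]
        have hrn : (i - p) % per = 0 := by rw [hrnext, if_pos hrtop]
        have hstepB : pvStepB p code acc i = acc ++ [PySem.List.pyGetD code i 0] := by
          simp only [pvStepB, ← hper, hmod, hrn]
          rw [if_pos (by omega)]
        rw [hstepA, hstepB]
        apply ih (i + 1) _ _ _ (by omega) (by omega)
        left
        refine ⟨?_, ?_, rfl⟩ <;> rw [hshift, hrn] <;> omega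
      · -- flag stays 0 : decrement, no append
        have hstepA : pvStepA p code (contador, acc, flag) i = (contador - 1, acc, 0) := by
          subst hf
          simp [pvStepA, hne, show ¬(contador = p + 1) from by omega,
            show ¬(contador = 0) from by omega]
        have hrn : (i - p) % per = r + 1 := by rw [hrnext, if_neg hrtop]
        have hstepB : pvStepB p code acc i = acc := by
          simp only [pvStepB, ← hper, hmod, hrn]
          rw [if_neg (by omega)]
        rw [hstepA, hstepB]
        apply ih (i + 1) _ _ _ (by omega) (by omega)
        right
        refine ⟨?_, ?_, rfl⟩ <;> rw [hshift, hrn] <;> omega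

-- ===== VERDICT (by name: the statement is the Claim_ definition above) =====
theorem paridade_lista_spec : Claim_equal_paridade_lista := by
  intro p code _ hpre
  have hp : 0 ≤ p := hpre
  unfold Spec_paridade_lista paridade_lista paridade_lista_alt
  by_cases hlen : (code.length : Int) ≤ p
  · rw [PySem.List.pyRange_one_eq_nil hlen, PySem.List.pyRange_one_eq_nil (by omega)]
    simp
  · have hplt : p < (code.length : Int) := by omega
    rw [PySem.List.pyRange_one_cons hplt]
    simp only [List.foldl_cons]
    have hfirst : pvStepA p code (0, [], 1) p = (1, [], 1) := by
      simp [pvStepA]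
    rw [hfirst]
    apply pv_loop p code hp (((code.length : Int) - (p + 1)).toNat) (p + 1) 1 1 []
      rfl (by omega)
    left
    refine ⟨?_, ?_, rfl⟩ <;>
      · have : p + 1 - 1 - p = (0 : Int) := by ring
        rw [this, Int.zero_emod]
        omega
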